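-- pv_equiv track=rewrite | github.com/LeeYoonhyeok/Coding | Algorithms/자료구조/괄호의합/이윤혁.py | solution
-- ===== SOURCE A (Python) =====
-- def solution(st):
--     stack = []
--     total_value, current_value = 0, 1
--     for i, char in enumerate(st):
--         if char == '(':
--             stack.append(char)
--             current_value *= 2
--         elif char == '[':
--             stack.append(char)
--             current_value *= 3
--         elif char == ')':
--             if not stack or stack[-1] != '(':
--                 return 0
--             if st[i-1] == '(':
--                 total_value += current_value
--             stack.pop()
--             current_value //= 2
--         elif char == ']':
--             if not stack or stack[-1] != '[':
--                 return 0
--             if st[i-1] == '[':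
--                 total_value += current_value
--             stack.pop()
--             current_value //= 3
--
--     if stack:
--         return 0
--
--     return total_value
-- ===== SOURCE B (Python) =====
-- def solution(st):
--     # Bottom-up group evaluation with a stack of frames (multiplier, expected
--     # close, sum of completed child groups, body-still-empty flag); a group's
--     # value is its multiplier if its body is empty, else multiplier * child sum.
--     frames = [[1, None, 0, False]]  # bottom frame collects top-level group values
--     for ch in st:
--         if ch == '(' or ch == '[':
--             frames[-1][3] = False
--             frames.append([2, ')', 0, True] if ch == '(' else [3, ']', 0, True])
--         elif ch == ')' or ch == ']':
--             mult, close, acc, empty = frames[-1]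
--             if ch != close:
--                 return 0
--             frames.pop()
--             frames[-1][2] += mult if empty else mult * acc
--             frames[-1][3] = False
--         else:
--             frames[-1][3] = False
--     if len(frames) != 1:
--         return 0
--     return frames[0][2]
-- ===== Notes on version B (the rewrite author's own statement) =====
-- stated objective: alternative
-- what changed: Replaces A's running-product current_value with *= and //= plus a bracket-char stack and string back-indexing by a single pass over a stack of group frames (multiplier, expected close, child sum, body-empty flag) that evaluates each bracket group bottom-up as its multiplier times the sum of its completed children (no division, no index arithmetic).
import Mathlib
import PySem

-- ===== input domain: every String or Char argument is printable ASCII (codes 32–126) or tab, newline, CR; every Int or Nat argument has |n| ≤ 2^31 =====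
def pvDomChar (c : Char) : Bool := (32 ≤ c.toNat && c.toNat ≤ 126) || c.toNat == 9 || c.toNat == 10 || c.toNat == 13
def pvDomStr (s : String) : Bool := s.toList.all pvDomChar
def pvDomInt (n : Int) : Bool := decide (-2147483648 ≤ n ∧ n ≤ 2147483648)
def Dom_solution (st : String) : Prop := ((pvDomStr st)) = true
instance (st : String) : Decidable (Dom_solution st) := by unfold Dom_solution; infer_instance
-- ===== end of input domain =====

-- B replaces A's running-product/floor-division stack by bottom-up group evaluation with a
-- stack of frames (multiplier, expected close, child sum, body-empty flag): alternative decomposition.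

-- ===== PORT A =====
-- literal port of A's for-loop over enumerate(st) with stack / total_value / current_value
def solLoop (st : String) : List (Int × Char) → List Char → Int → Int → Int
  | [], stack, total, _cur => if stack ≠ [] then 0 else total
  | (i, c) :: rest, stack, total, cur =>
    if c = '(' then solLoop st rest (stack ++ ['(']) total (cur * 2)
    else if c = '[' then solLoop st rest (stack ++ ['[']) total (cur * 3)
    else if c = ')' then
      if stack = [] ∨ stack.getLast? ≠ some '(' then 0
      else
        solLoop st rest stack.dropLast
          (if PySem.Str.pyGet? st (i - 1) = some '(' then total + cur else total)
          (PySem.Int.floordiv cur 2)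
    else if c = ']' then
      if stack = [] ∨ stack.getLast? ≠ some '[' then 0
      else
        solLoop st rest stack.dropLast
          (if PySem.Str.pyGet? st (i - 1) = some '[' then total + cur else total)
          (PySem.Int.floordiv cur 3)
    else solLoop st rest stack total cur

def solution (st : String) : Int :=
  solLoop st (PySem.List.enumerate st.toList 0) [] 0 1

-- ===== PORT B =====
-- a frame is (multiplier, expected closing bracket, sum of completed child groups, body-empty flag)
def altLoop : List Char → List (Int × Option Char × Int × Bool) → Int
  | [], frames =>
    match frames with
    | [(_, _, acc, _)] => acc
    | _ => 0
  | ch :: rest, frames =>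
    if ch = '(' ∨ ch = '[' then
      match frames with
      | (m, cl, acc, _) :: fs =>
        altLoop rest
          ((if ch = '(' then ((2 : Int), some ')', (0 : Int), true) else (3, some ']', 0, true))
            :: (m, cl, acc, false) :: fs)
      | [] => 0
    else if ch = ')' ∨ ch = ']' then
      match frames with
      | (m, some cl, acc, emp) :: (pm, pcl, pacc, _) :: fs =>
        if ch = cl then
          altLoop rest ((pm, pcl, pacc + (if emp then m else m * acc), false) :: fs)
        else 0
      | _ => 0
    else
      match frames with
      | (m, cl, acc, _) :: fs => altLoop rest ((m, cl, acc, false) :: fs)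
      | [] => 0

def solution_alt (st : String) : Int :=
  altLoop st.toList [(1, none, 0, false)]

-- ===== PRECONDITION & SPEC =====
def Spec_solution (st : String) (out : Int) : Prop := out = solution_alt st
instance (st : String) (out : Int) : Decidable (Spec_solution st out) := by unfold Spec_solution; infer_instance

-- ===== CLAIM (what is proved, stated in full; the proofs are below) =====
def Claim_equal_solution : Prop := ∀ (st : String), Dom_solution st → Spec_solution st (solution st)

-- ===== LEMMAS AND PROOFS =====
-- abbreviations for the proof
def fOpen (f : Int × Option Char × Int × Bool) : Char := if f.1 = 2 then '(' else '['

def wprod : List (Int × Option Char × Int × Bool) → Int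
  | [] => 1
  | f :: fs => f.1 * wprod fs

def gsum : List (Int × Option Char × Int × Bool) → Int
  | [] => 0
  | f :: fs => f.1 * wprod fs * f.2.2.1 + gsum fs

-- the simulation invariant between A's state (stack, total, cur) at index k and B's frames
def SimInv (st : String) (k : Nat) (frames : List (Int × Option Char × Int × Bool))
    (stack : List Char) (t v : Int) : Prop :=
  (∃ a e, frames.getLast? = some (1, none, a, e)) ∧
  (∀ f ∈ frames.dropLast, (f.1 = 2 ∧ f.2.1 = some ')') ∨ (f.1 = 3 ∧ f.2.1 = some ']')) ∧
  stack = (frames.dropLast.map fOpen).reverse ∧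
  v = wprod frames ∧
  t = gsum frames ∧
  (2 ≤ frames.length → 1 ≤ k ∧
    ∀ f fs, frames = f :: fs →
      (f.2.2.2 = true ↔ PySem.Str.pyGet? st ((k : Int) - 1) = some (fOpen f)) ∧
      (f.2.2.2 = true → f.2.2.1 = 0))
@[simp] theorem fOpen_mk (m : Int) (cl : Option Char) (a : Int) (e : Bool) :
    fOpen (m, cl, a, e) = if m = 2 then '(' else '[' := rfl

@[simp] theorem wprod_nil : wprod [] = 1 := rfl
@[simp] theorem wprod_cons (f : Int × Option Char × Int × Bool) (fs) :
    wprod (f :: fs) = f.1 * wprod fs := rfl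
@[simp] theorem gsum_nil : gsum [] = 0 := rfl
@[simp] theorem gsum_cons (f : Int × Option Char × Int × Bool) (fs) :
    gsum (f :: fs) = f.1 * wprod fs * f.2.2.1 + gsum fs := rfl

theorem drop_head (l : List Char) (k : Nat) (c : Char) (rest : List Char)
    (h : l.drop k = c :: rest) : l[k]? = some c := by
  have h2 : (List.drop k l)[0]? = l[k+0]? := List.getElem?_drop
  simp [h] at h2; exact h2.symm

theorem fdiv_two (a : Int) : PySem.Int.floordiv (2*a) 2 = a := by
  have := PySem.Int.floordiv_eq_iff_of_pos (a := 2*a) (b := 2) (q := a) (by norm_num)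
  omega

theorem fdiv_three (a : Int) : PySem.Int.floordiv (3*a) 3 = a := by
  have := PySem.Int.floordiv_eq_iff_of_pos (a := 3*a) (b := 3) (q := a) (by norm_num)
  omega

-- the frame-shape clauses ignore the acc/flag components of the head frame
theorem shape_head_swap (m : Int) (cl : Option Char) (a1 a2 : Int) (e1 e2 : Bool)
    (fs : List (Int × Option Char × Int × Bool))
    (h : ∀ f ∈ ((m,cl,a1,e1) :: fs).dropLast,
      (f.1 = 2 ∧ f.2.1 = some ')') ∨ (f.1 = 3 ∧ f.2.1 = some ']')) :
    ∀ f ∈ ((m,cl,a2,e2) :: fs).dropLast,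
      (f.1 = 2 ∧ f.2.1 = some ')') ∨ (f.1 = 3 ∧ f.2.1 = some ']') := by
  cases fs with
  | nil => intro f hf; simp at hf
  | cons g gs =>
    intro f hf
    rcases List.mem_cons.mp (by simpa [List.dropLast_cons₂] using hf) with h1 | h1
    · subst h1; simpa using h (m,cl,a1,e1) (by simp [List.dropLast_cons₂])
    · exact h f (by simp [List.dropLast_cons₂, h1])

theorem map_fOpen_swap (m : Int) (cl : Option Char) (a1 a2 : Int) (e1 e2 : Bool)
    (fs : List (Int × Option Char × Int × Bool)) :
    List.map fOpen (((m,cl,a2,e2) :: fs).dropLast) = List.map fOpen (((m,cl,a1,e1) :: fs).dropLast) := by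
  cases fs <;> simp [List.dropLast_cons₂]

theorem main_sim (st : String) : ∀ (l : List Char) (k : Nat) frames stack t v,
    l = st.toList.drop k → SimInv st k frames stack t v →
    solLoop st (PySem.List.enumerate l (k : Int)) stack t v = altLoop l frames := by
  intro l
  induction l with
  | nil =>
    intro k frames stack t v _ hinv
    obtain ⟨⟨ba, be, hlast⟩, _hcl, hstack, _hv, ht, _hflag⟩ := hinv
    cases frames with
    | nil => simp at hlast
    | cons f fs =>
      obtain ⟨m, cl, acc, emp⟩ := f
      cases fs with
      | nil =>
        simp at hlast
        obtain ⟨h1, h2, h3, h4⟩ := hlast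
        subst h1; subst h2; subst h3
        simp [List.dropLast] at hstack
        simp [PySem.List.enumerate, solLoop, altLoop, hstack, ht]
      | cons g gs =>
        have hne : stack ≠ [] := by
          rw [hstack]; simp [List.dropLast]
        simp [PySem.List.enumerate, solLoop, altLoop, hne]
  | cons c rest ih =>
    intro k frames stack t v hl hinv
    obtain ⟨⟨ba, be, hlast⟩, hcl, hstack, hv, ht, hflag⟩ := hinv
    have hck : st.toList[k]? = some c := drop_head _ _ _ _ hl.symm
    have hrest : rest = st.toList.drop (k+1) := by
      rw [List.drop_add_one_eq_tail_drop, ← hl]; rfl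
    have hpy : PySem.Str.pyGet? st ((k : Int)) = some c := by simp [pysem, hck]
    have hcast : ((k+1 : Nat) : Int) = (k : Int) + 1 := by push_cast; ring
    have hpy1 : PySem.Str.pyGet? st (((k+1 : Nat) : Int) - 1) = some c := by
      rw [hcast]; simpa using hpy
    cases frames with
    | nil => simp at hlast
    | cons f fs =>
      obtain ⟨m, cl, acc, emp⟩ := f
      rw [PySem.List.enumerate_cons]
      by_cases hc1 : c = '('
      · -- push a '(' frame
        subst hc1
        rw [show altLoop ('(' :: rest) ((m, cl, acc, emp) :: fs)
            = altLoop rest ((2, some ')', 0, true) :: (m, cl, acc, false) :: fs) from by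
          simp [altLoop]]
        rw [show solLoop st (((k:Int), '(') :: PySem.List.enumerate rest ((k:Int)+1)) stack t v
            = solLoop st (PySem.List.enumerate rest ((k:Int)+1)) (stack ++ ['(']) t (v * 2) from by
          simp [solLoop]]
        rw [← hcast]
        apply ih (k+1) _ _ _ _ hrest
        refine ⟨?_, ?_, ?_, ?_, ?_, ?_⟩
        · cases fs with
          | nil =>
            simp at hlast
            exact ⟨acc, false, by simp [hlast.1, hlast.2.1]⟩
          | cons g gs =>
            exact ⟨ba, be, by simpa [List.getLast?_cons_cons] using hlast⟩
        · intro f' hf'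
          rcases List.mem_cons.mp (by simpa [List.dropLast_cons₂] using hf') with h1 | h1
          · subst h1; left; exact ⟨rfl, rfl⟩
          · exact shape_head_swap m cl acc acc emp false fs hcl f' h1
        · simp [List.dropLast_cons₂, hstack, map_fOpen_swap m cl acc acc emp false fs]
        · rw [hv]; simp only [wprod_cons]; ring
        · rw [ht]; simp only [gsum_cons, wprod_cons]; ring
        · intro _
          refine ⟨by omega, ?_⟩
          intro f' fs' hf'
          injection hf' with h1 _
          subst h1
          refine ⟨by simp; exact hck, by intro _; rfl⟩
      · by_cases hc2 : c = '['
        · -- push a '[' frame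
          subst hc2
          rw [show altLoop ('[' :: rest) ((m, cl, acc, emp) :: fs)
              = altLoop rest ((3, some ']', 0, true) :: (m, cl, acc, false) :: fs) from by
            simp [altLoop]]
          rw [show solLoop st (((k:Int), '[') :: PySem.List.enumerate rest ((k:Int)+1)) stack t v
              = solLoop st (PySem.List.enumerate rest ((k:Int)+1)) (stack ++ ['[']) t (v * 3) from by
            simp [solLoop]]
          rw [← hcast]
          apply ih (k+1) _ _ _ _ hrest
          refine ⟨?_, ?_, ?_, ?_, ?_, ?_⟩
          · cases fs with
            | nil =>
              simp at hlast
              exact ⟨acc, false, by simp [hlast.1, hlast.2.1]⟩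
            | cons g gs =>
              exact ⟨ba, be, by simpa [List.getLast?_cons_cons] using hlast⟩
          · intro f' hf'
            rcases List.mem_cons.mp (by simpa [List.dropLast_cons₂] using hf') with h1 | h1
            · subst h1; right; exact ⟨rfl, rfl⟩
            · exact shape_head_swap m cl acc acc emp false fs hcl f' h1
          · simp [List.dropLast_cons₂, hstack, map_fOpen_swap m cl acc acc emp false fs]
          · rw [hv]; simp only [wprod_cons]; ring
          · rw [ht]; simp only [gsum_cons, wprod_cons]; ring
          · intro _
            refine ⟨by omega, ?_⟩
            intro f' fs' hf'
            injection hf' with h1 _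
            subst h1
            refine ⟨by simp; exact hck, by intro _; rfl⟩
        · by_cases hc3 : c = ')'
          · subst hc3
            cases fs with
            | nil =>
              -- only the bottom frame: A sees an empty stack, B sees no expected close
              simp at hlast
              obtain ⟨h1, h2, _, _⟩ := hlast
              subst h1; subst h2
              simp [List.dropLast] at hstack
              simp [solLoop, altLoop, hstack]
            | cons p fs' =>
              obtain ⟨pm, pcl, pacc, pemp⟩ := p
              have hstack' : stack = (List.map fOpen (((pm,pcl,pacc,pemp) :: fs').dropLast)).reverse
                  ++ [if m = 2 then '(' else '['] := by
                simp [hstack, List.dropLast_cons₂]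
              have hfhead : (m = 2 ∧ cl = some ')') ∨ (m = 3 ∧ cl = some ']') := by
                simpa using hcl (m,cl,acc,emp) (by simp [List.dropLast_cons₂])
              rcases hfhead with ⟨hm, hcl'⟩ | ⟨hm, hcl'⟩
              · -- matching '(' on top: pop
                subst hm; subst hcl'
                obtain ⟨hk1, hfl⟩ := hflag (by simp)
                obtain ⟨hiff, hacc0⟩ := hfl _ _ rfl
                simp only at hiff hacc0
                have hglast : stack.getLast? = some '(' := by
                  rw [hstack']; simp
                have hsne : stack ≠ [] := by rw [hstack']; simp
                have hdl : stack.dropLast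
                    = (List.map fOpen (((pm,pcl,pacc,pemp) :: fs').dropLast)).reverse := by
                  rw [hstack']; simp
                rw [show solLoop st (((k:Int), ')') :: PySem.List.enumerate rest ((k:Int)+1)) stack t v
                    = solLoop st (PySem.List.enumerate rest ((k:Int)+1)) stack.dropLast
                        (if PySem.Str.pyGet? st ((k:Int) - 1) = some '(' then t + v else t)
                        (PySem.Int.floordiv v 2) from by
                  simp [solLoop, hsne, hglast]]
                rw [show altLoop (')' :: rest) ((2, some ')', acc, emp) :: (pm,pcl,pacc,pemp) :: fs')
                    = altLoop rest ((pm, pcl, pacc + (if emp then 2 else 2 * acc), false) :: fs') from by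
                  simp [altLoop]]
                rw [← hcast]
                apply ih (k+1) _ _ _ _ hrest
                refine ⟨?_, ?_, ?_, ?_, ?_, ?_⟩
                · cases fs' with
                  | nil =>
                    simp [List.getLast?_cons_cons] at hlast
                    exact ⟨pacc + (if emp then 2 else 2 * acc), false,
                      by simp [hlast.1, hlast.2.1]⟩
                  | cons g gs =>
                    exact ⟨ba, be, by simpa [List.getLast?_cons_cons] using hlast⟩
                · apply shape_head_swap pm pcl pacc (pacc + (if emp then 2 else 2 * acc)) pemp false
                  intro f' hf'
                  exact hcl f' (by simp [List.dropLast_cons₂]; right; simpa [List.dropLast_cons₂] using hf')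
                · rw [hdl, map_fOpen_swap pm pcl pacc (pacc + (if emp then 2 else 2 * acc)) pemp false]
                · rw [hv]; simp only [wprod_cons]; exact fdiv_two _
                · -- total bookkeeping
                  by_cases hemp : emp = true
                  · have ha0 : acc = 0 := hacc0 hemp
                    have hcond : PySem.Str.pyGet? st ((k:Int) - 1) = some '(' := by
                      have := hiff.mp hemp; simpa using this
                    rw [if_pos hcond, ht, ha0, hv]
                    simp [hemp]; ring
                  · have hcond : ¬ PySem.Str.pyGet? st ((k:Int) - 1) = some '(' := by
                      intro hco
                      exact hemp (hiff.mpr (by simpa using hco))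
                    rw [if_neg hcond, ht]
                    simp [hemp]; ring
                · intro _
                  refine ⟨by omega, ?_⟩
                  intro f' fs'' hf'
                  injection hf' with h1 _
                  subst h1
                  refine ⟨?_, by simp⟩
                  simp only [Bool.false_eq_true, false_iff]
                  intro hco
                  rw [hpy1] at hco
                  simp at hco
                  split_ifs at hco <;> simp_all
              · -- '[' on top but ')' seen: both invalid
                subst hm; subst hcl'
                have hglast : stack.getLast? = some '[' := by
                  rw [hstack']; simp
                rw [show altLoop (')' :: rest) ((3, some ']', acc, emp) :: (pm,pcl,pacc,pemp) :: fs')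
                    = 0 from by simp [altLoop]]
                simp [solLoop, hglast]
          · by_cases hc4 : c = ']'
            · subst hc4
              cases fs with
              | nil =>
                simp at hlast
                obtain ⟨h1, h2, _, _⟩ := hlast
                subst h1; subst h2
                simp [List.dropLast] at hstack
                simp [solLoop, altLoop, hstack]
              | cons p fs' =>
                obtain ⟨pm, pcl, pacc, pemp⟩ := p
                have hstack' : stack = (List.map fOpen (((pm,pcl,pacc,pemp) :: fs').dropLast)).reverse
                    ++ [if m = 2 then '(' else '['] := by
                  simp [hstack, List.dropLast_cons₂]
                have hfhead : (m = 2 ∧ cl = some ')') ∨ (m = 3 ∧ cl = some ']') := by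
                  simpa using hcl (m,cl,acc,emp) (by simp [List.dropLast_cons₂])
                rcases hfhead with ⟨hm, hcl'⟩ | ⟨hm, hcl'⟩
                · -- '(' on top but ']' seen: both invalid
                  subst hm; subst hcl'
                  have hglast : stack.getLast? = some '(' := by
                    rw [hstack']; simp
                  rw [show altLoop (']' :: rest) ((2, some ')', acc, emp) :: (pm,pcl,pacc,pemp) :: fs')
                      = 0 from by simp [altLoop]]
                  simp [solLoop, hglast]
                · -- matching '[' on top: pop
                  subst hm; subst hcl'
                  obtain ⟨hk1, hfl⟩ := hflag (by simp)
                  obtain ⟨hiff, hacc0⟩ := hfl _ _ rfl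
                  simp only at hiff hacc0
                  have hglast : stack.getLast? = some '[' := by
                    rw [hstack']; simp
                  have hsne : stack ≠ [] := by rw [hstack']; simp
                  have hdl : stack.dropLast
                      = (List.map fOpen (((pm,pcl,pacc,pemp) :: fs').dropLast)).reverse := by
                    rw [hstack']; simp
                  rw [show solLoop st (((k:Int), ']') :: PySem.List.enumerate rest ((k:Int)+1)) stack t v
                      = solLoop st (PySem.List.enumerate rest ((k:Int)+1)) stack.dropLast
                          (if PySem.Str.pyGet? st ((k:Int) - 1) = some '[' then t + v else t)
                          (PySem.Int.floordiv v 3) from by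
                    simp [solLoop, hsne, hglast]]
                  rw [show altLoop (']' :: rest) ((3, some ']', acc, emp) :: (pm,pcl,pacc,pemp) :: fs')
                      = altLoop rest ((pm, pcl, pacc + (if emp then 3 else 3 * acc), false) :: fs') from by
                    simp [altLoop]]
                  rw [← hcast]
                  apply ih (k+1) _ _ _ _ hrest
                  refine ⟨?_, ?_, ?_, ?_, ?_, ?_⟩
                  · cases fs' with
                    | nil =>
                      simp [List.getLast?_cons_cons] at hlast
                      exact ⟨pacc + (if emp then 3 else 3 * acc), false,
                        by simp [hlast.1, hlast.2.1]⟩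
                    | cons g gs =>
                      exact ⟨ba, be, by simpa [List.getLast?_cons_cons] using hlast⟩
                  · apply shape_head_swap pm pcl pacc (pacc + (if emp then 3 else 3 * acc)) pemp false
                    intro f' hf'
                    exact hcl f' (by simp [List.dropLast_cons₂]; right; simpa [List.dropLast_cons₂] using hf')
                  · rw [hdl, map_fOpen_swap pm pcl pacc (pacc + (if emp then 3 else 3 * acc)) pemp false]
                  · rw [hv]; simp only [wprod_cons]; exact fdiv_three _
                  · by_cases hemp : emp = true
                    · have ha0 : acc = 0 := hacc0 hemp
                      have hcond : PySem.Str.pyGet? st ((k:Int) - 1) = some '[' := by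
                        have := hiff.mp hemp; simpa using this
                      rw [if_pos hcond, ht, ha0, hv]
                      simp [hemp]; ring
                    · have hcond : ¬ PySem.Str.pyGet? st ((k:Int) - 1) = some '[' := by
                        intro hco
                        exact hemp (hiff.mpr (by simpa using hco))
                      rw [if_neg hcond, ht]
                      simp [hemp]; ring
                  · intro _
                    refine ⟨by omega, ?_⟩
                    intro f' fs'' hf'
                    injection hf' with h1 _
                    subst h1
                    refine ⟨?_, by simp⟩
                    simp only [Bool.false_eq_true, false_iff]
                    intro hco
                    rw [hpy1] at hco
                    simp at hco
                    split_ifs at hco <;> simp_all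
            · -- any other character: both just clear the body-empty flag / move on
              rw [show solLoop st (((k:Int), c) :: PySem.List.enumerate rest ((k:Int)+1)) stack t v
                  = solLoop st (PySem.List.enumerate rest ((k:Int)+1)) stack t v from by
                simp [solLoop, hc1, hc2, hc3, hc4]]
              rw [show altLoop (c :: rest) ((m, cl, acc, emp) :: fs)
                  = altLoop rest ((m, cl, acc, false) :: fs) from by
                simp [altLoop, hc1, hc2, hc3, hc4]]
              rw [← hcast]
              apply ih (k+1) _ _ _ _ hrest
              refine ⟨?_, ?_, ?_, ?_, ?_, ?_⟩
              · cases fs with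
                | nil =>
                  simp at hlast
                  exact ⟨acc, false, by simp [hlast.1, hlast.2.1]⟩
                | cons g gs =>
                  exact ⟨ba, be, by simpa [List.getLast?_cons_cons] using hlast⟩
              · exact shape_head_swap m cl acc acc emp false fs hcl
              · rw [hstack, map_fOpen_swap m cl acc acc emp false fs]
              · simpa using hv
              · simpa using ht
              · intro _
                refine ⟨by omega, ?_⟩
                intro f' fs'' hf'
                injection hf' with h1 _
                subst h1
                refine ⟨?_, by simp⟩
                simp only [Bool.false_eq_true, false_iff]
                intro hco
                rw [hpy1] at hco
                simp at hco
                split_ifs at hco <;> simp_all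

theorem solution_spec : Claim_equal_solution := by
  intro st _
  unfold Spec_solution solution solution_alt
  have := main_sim st st.toList 0 [(1, none, 0, false)] [] 0 1 (by simp) ?_
  · simpa using this
  · refine ⟨⟨0, false, by simp⟩, by simp [List.dropLast], by simp [List.dropLast], by simp, by simp, by simp⟩
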